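-- pv_equiv track=rewrite | github.com/XyzHuy/-DL-Fine-tuning-coding-model | data/solution/Solution2959.py | numberOfSets
-- ===== SOURCE A (Python) =====
-- from typing import List
-- from collections import defaultdict
-- import heapq
-- from itertools import combinations
--
-- def numberOfSets(n: int, maxDistance: int, roads: List[List[int]]) -> int:
--     def shortest_paths(graph, source, num_nodes):
--         distances = [float('inf')] * num_nodes
--         distances[source] = 0
--         pq = [(0, source)]
--         while pq:
--             dist, node = heapq.heappop(pq)
--             if dist > distances[node]:
--                 continue
--             for neighbor, weight in graph[node]:
--                 if dist + weight < distances[neighbor]: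
--                     distances[neighbor] = dist + weight
--                     heapq.heappush(pq, (dist + weight, neighbor))
--         return distances
--
--     def is_valid_subset(subset):
--         # Build the graph for the current subset of branches
--         graph = defaultdict(list)
--         for u, v, w in roads:
--             if u in subset and v in subset:
--                 graph[u].append((v, w))
--                 graph[v].append((u, w))
--
--         # Check the distance between all pairs of nodes in the subset
--         for node in subset:
--             distances = shortest_paths(graph, node, n)
--             for other_node in subset:
--                 if other_node != node and distances[other_node] > maxDistance:
--                     return False
--         return True
--
--     count = 0
--     # Check all subsets of branches
--     for r in range(n + 1):
--         for subset in combinations(range(n), r):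
--             if is_valid_subset(subset):
--                 count += 1
--     return count
-- ===== SOURCE B (Python) =====
-- from itertools import combinations
--
-- def numberOfSets(n, maxDistance, roads):
--     count = 0
--     for r in range(n + 1):
--         for subset in combinations(range(n), r):
--             members = set(subset)
--             edges = []
--             for u, v, w in roads:
--                 if u in members and v in members:
--                     edges.append((u, v, w))
--                     edges.append((v, u, w))
--             ok = True
--             for s in subset:
--                 dist = [float('inf')] * n
--                 dist[s] = 0
--                 changed = True
--                 while changed:
--                     changed = False
--                     for u, v, w in edges:
--                         if dist[u] + w < dist[v]:
--                             dist[v] = dist[u] + w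
--                             changed = True
--                 for t in subset:
--                     if t != s and dist[t] > maxDistance:
--                         ok = False
--             if ok:
--                 count += 1
--     return count
-- ===== Notes on version B (the rewrite author's own statement) =====
-- stated objective: alternative
-- what changed: The per-source Dijkstra with a lazy binary heap is replaced by Bellman-Ford-style relaxation of the subset's symmetric edge list repeated until no distance changes; no heap, no adjacency dict.
import Mathlib
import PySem

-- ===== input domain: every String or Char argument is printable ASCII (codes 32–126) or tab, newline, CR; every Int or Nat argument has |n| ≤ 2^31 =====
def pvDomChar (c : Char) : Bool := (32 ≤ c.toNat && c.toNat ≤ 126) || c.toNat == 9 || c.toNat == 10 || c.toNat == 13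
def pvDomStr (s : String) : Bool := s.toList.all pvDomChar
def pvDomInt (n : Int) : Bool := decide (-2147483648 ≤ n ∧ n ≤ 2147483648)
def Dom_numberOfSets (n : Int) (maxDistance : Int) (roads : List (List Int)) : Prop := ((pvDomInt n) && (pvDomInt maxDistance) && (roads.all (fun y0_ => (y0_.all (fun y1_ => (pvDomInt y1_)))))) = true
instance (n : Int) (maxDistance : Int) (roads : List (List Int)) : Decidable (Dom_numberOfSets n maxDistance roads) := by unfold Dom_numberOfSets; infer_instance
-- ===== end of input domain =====

-- B replaces A's per-source lazy-heap Dijkstra by Bellman-Ford-style relaxation of the subset's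
-- edge list repeated until no distance changes (objective: alternative algorithm, similar cost).
-- Python's float('inf') entries are modeled as `none`; the distance array (only ever indexed at
-- 0..n-1) is modeled as a function Int → Option Int. The `lex3lt`/`lex2lt` dite guards below are
-- totality guards only (they always hold on inputs satisfying Pre_, as the proofs show).

-- inf comparisons (Python float('inf') sentinel modeled as none)
def ltInf (x : Int) (d : Option Int) : Bool := match d with | none => true | some y => decide (x < y)
def gtInf (d : Option Int) (m : Int) : Bool := match d with | none => true | some x => decide (m < x)

-- totality-guard measures (not part of Python's computation; used only to make the loops total)
def ncount (n' : Nat) (d : Int → Option Int) : Nat :=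
  ((Finset.range n').filter (fun (v : Nat) => d (v : Int) = none)).card
def sfin (n' : Nat) (d : Int → Option Int) : Nat :=
  ∑ v ∈ Finset.range n', ((d ((v : Nat) : Int)).getD 0).toNat
def lex3lt (a b : Nat × Nat × Nat) : Bool :=
  a.1 < b.1 || (a.1 == b.1 && (a.2.1 < b.2.1 || (a.2.1 == b.2.1 && a.2.2 < b.2.2)))
def lex2lt (a b : Nat × Nat) : Bool := a.1 < b.1 || (a.1 == b.1 && a.2 < b.2)

lemma lex3lt_lex {a b : Nat × Nat × Nat} (h : lex3lt a b = true) :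
    Prod.Lex (· < ·) (Prod.Lex (· < ·) (· < ·)) a b := by
  obtain ⟨a1, a2, a3⟩ := a; obtain ⟨b1, b2, b3⟩ := b
  simp only [lex3lt, Bool.or_eq_true, Bool.and_eq_true, decide_eq_true_eq, beq_iff_eq] at h
  rcases h with h | ⟨h1, h2 | ⟨h2, h3⟩⟩
  · exact Prod.Lex.left _ _ h
  · subst h1; exact Prod.Lex.right _ (Prod.Lex.left _ _ h2)
  · subst h1; subst h2; exact Prod.Lex.right _ (Prod.Lex.right _ h3)

lemma lex2lt_lex {a b : Nat × Nat} (h : lex2lt a b = true) :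
    Prod.Lex (· < ·) (· < ·) a b := by
  obtain ⟨a1, a2⟩ := a; obtain ⟨b1, b2⟩ := b
  simp only [lex2lt, Bool.or_eq_true, Bool.and_eq_true, decide_eq_true_eq, beq_iff_eq] at h
  rcases h with h | ⟨h1, h2⟩
  · exact Prod.Lex.left _ _ h
  · subst h1; exact Prod.Lex.right _ h2

-- ===== PORT A =====
def buildGraph (subset : List Int) (roads : List (List Int)) : PySem.Dict Int (List (Int × Int)) :=
  roads.foldl (fun g road =>
    match road with
    | [u, v, w] =>
      if subset.contains u && subset.contains v then
        let g1 := g.insert u (g.getD u [] ++ [(v, w)])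
        g1.insert v (g1.getD v [] ++ [(u, w)])
      else g
    | _ => g) PySem.Dict.empty

def pairLt (a b : Int × Int) : Bool := a.1 < b.1 || (a.1 == b.1 && a.2 < b.2)
def minEntry (x : Int × Int) (xs : List (Int × Int)) : Int × Int :=
  xs.foldl (fun m y => if pairLt y m then y else m) x

def relaxA (p : Int) (adj : List (Int × Int)) (st : (Int → Option Int) × List (Int × Int)) :
    (Int → Option Int) × List (Int × Int) :=
  adj.foldl (fun st vw =>
    if ltInf (p + vw.2) (st.1 vw.1) then
      (fun z => if z = vw.1 then some (p + vw.2) else st.1 z, st.2 ++ [(p + vw.2, vw.1)])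
    else st) st

def muA (n' : Nat) (st : (Int → Option Int) × List (Int × Int)) : Nat × Nat × Nat :=
  (ncount n' st.1, sfin n' st.1, st.2.length)

def stepA (g : PySem.Dict Int (List (Int × Int))) (st : (Int → Option Int) × List (Int × Int)) :
    (Int → Option Int) × List (Int × Int) :=
  match st.2 with
  | [] => st
  | q :: qs =>
    let m := minEntry q qs
    let rest := (q :: qs).erase m
    match st.1 m.2 with
    | some y => if y < m.1 then (st.1, rest) else relaxA m.1 (g.getD m.2 []) (st.1, rest)
    | none => relaxA m.1 (g.getD m.2 []) (st.1, rest)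

def dloop (n' : Nat) (g : PySem.Dict Int (List (Int × Int))) (st : (Int → Option Int) × List (Int × Int)) :
    Int → Option Int :=
  match st.2 with
  | [] => st.1
  | _ :: _ =>
    let st' := stepA g st
    if h : lex3lt (muA n' st') (muA n' st) = true then dloop n' g st' else st'.1
termination_by muA n' st
decreasing_by
  exact lex3lt_lex h

def validA (n maxDistance : Int) (roads : List (List Int)) (subset : List Int) : Bool :=
  let g := buildGraph subset roads
  subset.all (fun node =>
    let dist := dloop n.toNat g ((fun z => if z = node then some 0 else none), [(0, node)])
    subset.all (fun other => !(decide (other ≠ node) && gtInf (dist other) maxDistance)))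

def numberOfSets (n : Int) (maxDistance : Int) (roads : List (List Int)) : Int :=
  (PySem.List.pyRange 0 (n + 1) 1).foldl (fun count r =>
    (PySem.List.combinations (PySem.List.pyRange 0 n 1) r.toNat).foldl
      (fun c subset => if validA n maxDistance roads subset then c + 1 else c) count) 0

-- ===== PORT B =====
def buildEdges (members : PySem.Set Int) (roads : List (List Int)) : List (Int × Int × Int) :=
  roads.foldl (fun es road =>
    match road with
    | [u, v, w] =>
      if PySem.Set.contains members u && PySem.Set.contains members v then
        es ++ [(u, v, w), (v, u, w)]
      else es
    | _ => es) []

def relaxB (edges : List (Int × Int × Int)) (st : (Int → Option Int) × Bool) :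
    (Int → Option Int) × Bool :=
  edges.foldl (fun st e =>
    match st.1 e.1 with
    | none => st
    | some x =>
      if ltInf (x + e.2.2) (st.1 e.2.1) then
        (fun z => if z = e.2.1 then some (x + e.2.2) else st.1 z, true)
      else st) st

def bloop (n' : Nat) (edges : List (Int × Int × Int)) (d : Int → Option Int) : Int → Option Int :=
  let st := relaxB edges (d, false)
  if st.2 then
    if h : lex2lt (ncount n' st.1, sfin n' st.1) (ncount n' d, sfin n' d) = true then
      bloop n' edges st.1
    else st.1
  else d
termination_by (ncount n' d, sfin n' d)
decreasing_by exact lex2lt_lex h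

def validB (n maxDistance : Int) (roads : List (List Int)) (subset : List Int) : Bool :=
  let members := PySem.Set.ofList subset
  let edges := buildEdges members roads
  subset.foldl (fun ok s =>
    let dist := bloop n.toNat edges (fun z => if z = s then some 0 else none)
    subset.foldl (fun ok2 t => if decide (t ≠ s) && gtInf (dist t) maxDistance then false else ok2) ok) true

def numberOfSets_alt (n : Int) (maxDistance : Int) (roads : List (List Int)) : Int :=
  (PySem.List.pyRange 0 (n + 1) 1).foldl (fun count r =>
    (PySem.List.combinations (PySem.List.pyRange 0 n 1) r.toNat).foldl
      (fun c subset => if validB n maxDistance roads subset then c + 1 else c) count) 0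


-- ===== PRECONDITION & SPEC =====
-- Pre_ excludes exactly the inputs (with n ≥ 0, which is when A touches roads) where A raises
-- ValueError (a road row that is not a length-3 triple) or diverges (a negative-weight road between
-- two in-range nodes makes A's relaxation loop run forever once a subset containing both endpoints
-- is reached). For n < 0 A returns 0 before reading roads, so no condition is imposed there.
def Pre_numberOfSets (n : Int) (maxDistance : Int) (roads : List (List Int)) : Prop :=
  0 ≤ n → ∀ road ∈ roads, road.length = 3 ∧
    ((0 ≤ road.getD 0 0 ∧ road.getD 0 0 < n ∧ 0 ≤ road.getD 1 0 ∧ road.getD 1 0 < n) →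
      0 ≤ road.getD 2 0)

instance (n : Int) (maxDistance : Int) (roads : List (List Int)) :
    Decidable (Pre_numberOfSets n maxDistance roads) := by
  unfold Pre_numberOfSets; infer_instance

def pvWitness_numberOfSets : Int × Int × List (List Int) := (2, 3, [[0, 1, 2]])

def Spec_numberOfSets (n : Int) (maxDistance : Int) (roads : List (List Int)) (out : Int) : Prop := out = numberOfSets_alt n maxDistance roads
instance (n : Int) (maxDistance : Int) (roads : List (List Int)) (out : Int) : Decidable (Spec_numberOfSets n maxDistance roads out) := by unfold Spec_numberOfSets; infer_instance

-- ===== CLAIM (what is proved, stated in full; the proofs are below) =====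
def Claim_equal_numberOfSets : Prop := ∀ (n : Int) (maxDistance : Int) (roads : List (List Int)), Dom_numberOfSets n maxDistance roads → Pre_numberOfSets n maxDistance roads → Spec_numberOfSets n maxDistance roads (numberOfSets n maxDistance roads)

-- ===== LEMMAS AND PROOFS =====
-- ===== proofs =====
inductive Reach (E : List (Int × Int × Int)) (s : Int) : Int → Int → Prop
  | refl : Reach E s s 0
  | step {u x v w} : Reach E s u x → (u, v, w) ∈ E → Reach E s v (x + w)

def Achieves (E : List (Int × Int × Int)) (s : Int) (d : Int → Option Int) : Prop :=
  ∀ v x, d v = some x → Reach E s v x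
def StableAt (E : List (Int × Int × Int)) (d : Int → Option Int) : Prop :=
  ∀ u v w x, (u, v, w) ∈ E → d u = some x → ∃ y, d v = some y ∧ y ≤ x + w
def BaseAt (s : Int) (d : Int → Option Int) : Prop := ∃ z, d s = some z ∧ z ≤ 0
def Dle (d' d : Int → Option Int) : Prop := ∀ v x, d v = some x → ∃ x', d' v = some x' ∧ x' ≤ x

theorem Dle_refl (d : Int → Option Int) : Dle d d := fun v x h => ⟨x, h, le_refl x⟩
theorem Dle_trans {d1 d2 d3 : Int → Option Int} (h12 : Dle d1 d2) (h23 : Dle d2 d3) : Dle d1 d3 := by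
  intro v x h
  obtain ⟨x', hx', hle'⟩ := h23 v x h
  obtain ⟨x'', hx'', hle''⟩ := h12 v x' hx'
  exact ⟨x'', hx'', le_trans hle'' hle'⟩

theorem reach_chase {E : List (Int × Int × Int)} {s : Int} {d : Int → Option Int}
    (hst : StableAt E d) (hb : BaseAt s d) {v x : Int} (hr : Reach E s v x) :
    ∃ y, d v = some y ∧ y ≤ x := by
  induction hr with
  | refl => obtain ⟨z, hz, hz0⟩ := hb; exact ⟨z, hz, hz0⟩
  | step hr he ih =>
    obtain ⟨y, hy, hyx⟩ := ih
    obtain ⟨y', hy', hle⟩ := hst _ _ _ _ he hy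
    exact ⟨y', hy', le_trans hle (by omega)⟩

theorem dist_unique {E : List (Int × Int × Int)} {s : Int} {d1 d2 : Int → Option Int}
    (ha1 : Achieves E s d1) (hs1 : StableAt E d1) (hb1 : BaseAt s d1)
    (ha2 : Achieves E s d2) (hs2 : StableAt E d2) (hb2 : BaseAt s d2) :
    ∀ v, d1 v = d2 v := by
  intro v
  cases h1 : d1 v with
  | none =>
    cases h2 : d2 v with
    | none => rfl
    | some x => obtain ⟨y, hy, _⟩ := reach_chase hs1 hb1 (ha2 v x h2); rw [h1] at hy; cases hy
  | some x =>
    cases h2 : d2 v with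
    | none => obtain ⟨y, hy, _⟩ := reach_chase hs2 hb2 (ha1 v x h1); rw [h2] at hy; cases hy
    | some x' =>
      obtain ⟨y, hy, hle⟩ := reach_chase hs2 hb2 (ha1 v x h1)
      obtain ⟨y', hy', hle'⟩ := reach_chase hs1 hb1 (ha2 v x' h2)
      rw [h2] at hy; rw [h1] at hy'
      injection hy with hy; injection hy' with hy'
      have hxx : x = x' := by omega
      rw [hxx]

theorem reach_nonneg {E : List (Int × Int × Int)} {s : Int}
    (hw : ∀ e ∈ E, 0 ≤ e.2.2) {v x : Int} (hr : Reach E s v x) : 0 ≤ x := by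
  induction hr with
  | refl => omega
  | step hr he ih => exact add_nonneg ih (by simpa using hw _ he)

theorem lex2lt_trans {a b c : Nat × Nat} (h1 : lex2lt a b = true) (h2 : lex2lt b c = true) :
    lex2lt a c = true := by
  simp only [lex2lt, Bool.or_eq_true, Bool.and_eq_true, decide_eq_true_eq, beq_iff_eq] at *
  omega

theorem measure_upd_none {n' : Nat} {d : Int → Option Int} {v0 a : Int}
    (hv0 : 0 ≤ v0) (hv0n : v0 < (n' : Int)) (hd : d v0 = none) :
    lex2lt (ncount n' (fun z => if z = v0 then some a else d z), sfin n' (fun z => if z = v0 then some a else d z))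
      (ncount n' d, sfin n' d) = true := by
  have hk : ((v0.toNat : Nat) : Int) = v0 := Int.toNat_of_nonneg hv0
  have hkn : v0.toNat < n' := by omega
  have hnc : ncount n' (fun z => if z = v0 then some a else d z) < ncount n' d := by
    apply Finset.card_lt_card
    constructor
    · intro v hv
      simp only [Finset.mem_filter, Finset.mem_range] at hv ⊢
      obtain ⟨hvr, hvp⟩ := hv
      refine ⟨hvr, ?_⟩
      by_cases hvk : (v : Int) = v0
      · simp [hvk] at hvp
      · simpa [hvk] using hvp
    · intro hsub
      have hmem : v0.toNat ∈ (Finset.range n').filter (fun (v : Nat) => d (v : Int) = none) := by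
        simp only [Finset.mem_filter, Finset.mem_range]
        exact ⟨hkn, by rw [hk]; exact hd⟩
      have := hsub hmem
      simp only [Finset.mem_filter, Finset.mem_range, hk] at this
      simp at this
  simp only [lex2lt, Bool.or_eq_true, Bool.and_eq_true, decide_eq_true_eq, beq_iff_eq]
  omega

theorem measure_upd_some {n' : Nat} {d : Int → Option Int} {v0 a x : Int}
    (hv0 : 0 ≤ v0) (hv0n : v0 < (n' : Int)) (hd : d v0 = some x) (ha : 0 ≤ a) (hax : a < x) :
    lex2lt (ncount n' (fun z => if z = v0 then some a else d z), sfin n' (fun z => if z = v0 then some a else d z))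
      (ncount n' d, sfin n' d) = true := by
  have hk : ((v0.toNat : Nat) : Int) = v0 := Int.toNat_of_nonneg hv0
  have hkn : v0.toNat < n' := by omega
  have hnc : ncount n' (fun z => if z = v0 then some a else d z) = ncount n' d := by
    unfold ncount
    apply congrArg Finset.card
    apply Finset.filter_congr
    intro v hv
    by_cases hvk : (v : Int) = v0
    · simp [hvk, hd]
    · simp [hvk]
  have hsf : sfin n' (fun z => if z = v0 then some a else d z) < sfin n' d := by
    unfold sfin
    apply Finset.sum_lt_sum
    · intro i _
      by_cases hik : (i : Int) = v0
      · simp [hik, hd]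
        omega
      · simp [hik]
    · refine ⟨v0.toNat, Finset.mem_range.mpr hkn, ?_⟩
      simp [hk, hd]
      omega
  simp only [lex2lt, Bool.or_eq_true, Bool.and_eq_true, decide_eq_true_eq, beq_iff_eq]
  omega

theorem relaxA_cons (p : Int) (vw : Int × Int) (adj : List (Int × Int))
    (st : (Int → Option Int) × List (Int × Int)) :
    relaxA p (vw :: adj) st =
      relaxA p adj
        (if ltInf (p + vw.2) (st.1 vw.1) then
          (fun z => if z = vw.1 then some (p + vw.2) else st.1 z, st.2 ++ [(p + vw.2, vw.1)])
        else st) := rfl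

theorem relaxA_spec {E : List (Int × Int × Int)} {s : Int} {n' : Nat}
    (hw : ∀ e ∈ E, 0 ≤ e.2.2)
    (hrange : ∀ e ∈ E, (0 ≤ e.1 ∧ e.1 < (n' : Int)) ∧ (0 ≤ e.2.1 ∧ e.2.1 < (n' : Int)))
    {u0 p : Int} (hp0 : 0 ≤ p) (hpr : Reach E s u0 p) :
    ∀ (adj : List (Int × Int)) (d : Int → Option Int) (pq : List (Int × Int)),
    (∀ vw ∈ adj, (u0, vw.1, vw.2) ∈ E) →
    Achieves E s d →
    (∀ q ∈ pq, ∃ y, d q.2 = some y ∧ y ≤ q.1) →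
    d u0 = some p →
    Dle (relaxA p adj (d, pq)).1 d ∧
    Achieves E s (relaxA p adj (d, pq)).1 ∧
    (∀ q ∈ (relaxA p adj (d, pq)).2, ∃ y, (relaxA p adj (d, pq)).1 q.2 = some y ∧ y ≤ q.1) ∧
    (∀ q ∈ pq, q ∈ (relaxA p adj (d, pq)).2) ∧
    (∀ vw ∈ adj, ∃ y, (relaxA p adj (d, pq)).1 vw.1 = some y ∧ y ≤ p + vw.2) ∧
    (relaxA p adj (d, pq)).1 u0 = some p ∧
    (∀ u x, (relaxA p adj (d, pq)).1 u = some x → d u = some x ∨ (x, u) ∈ (relaxA p adj (d, pq)).2) ∧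
    (((relaxA p adj (d, pq)).1 = d ∧ (relaxA p adj (d, pq)).2 = pq) ∨
      lex2lt (ncount n' (relaxA p adj (d, pq)).1, sfin n' (relaxA p adj (d, pq)).1)
        (ncount n' d, sfin n' d) = true) := by
  intro adj
  induction adj with
  | nil =>
    intro d pq _ hach hpq hu0
    refine ⟨Dle_refl d, hach, hpq, fun q hq => hq, by simp, hu0, fun u x h => Or.inl h, Or.inl ⟨rfl, rfl⟩⟩
  | cons e0 rest ih =>
    intro d pq hadjE hach hpq hu0
    have heE : (u0, e0.1, e0.2) ∈ E := hadjE e0 (List.mem_cons_self ..)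
    have hwe0 : 0 ≤ e0.2 := hw _ heE
    have hrng := (hrange _ heE).2
    rw [relaxA_cons]
    by_cases hlt : ltInf (p + e0.2) (d e0.1) = true
    · -- update fires
      rw [if_pos hlt]
      set d1 : Int → Option Int := fun z => if z = e0.1 then some (p + e0.2) else d z with hd1
      have hDle1 : Dle d1 d := by
        intro v x hx
        by_cases hv : v = e0.1
        · subst hv
          rw [hx] at hlt
          simp only [ltInf, decide_eq_true_eq] at hlt
          exact ⟨p + e0.2, by simp [hd1], le_of_lt hlt⟩
        · exact ⟨x, by simp [hd1, hv, hx], le_refl x⟩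
      have hach1 : Achieves E s d1 := by
        intro v x hx
        by_cases hv : v = e0.1
        · subst hv
          simp only [hd1, if_pos rfl] at hx
          injection hx with hx
          rw [← hx]
          exact Reach.step hpr heE
        · simp only [hd1, if_neg hv] at hx
          exact hach v x hx
      have hpq1 : ∀ q ∈ pq ++ [(p + e0.2, e0.1)], ∃ y, d1 q.2 = some y ∧ y ≤ q.1 := by
        intro q hq
        rcases List.mem_append.mp hq with hq | hq
        · obtain ⟨y, hy, hle⟩ := hpq q hq
          by_cases hv : q.2 = e0.1
          · rw [hv] at hy
            rw [hy] at hlt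
            simp only [ltInf, decide_eq_true_eq] at hlt
            exact ⟨p + e0.2, by simp [hd1, hv], by omega⟩
          · exact ⟨y, by simp [hd1, hv, hy], hle⟩
        · simp only [List.mem_singleton] at hq
          subst hq
          exact ⟨p + e0.2, by simp [hd1], le_refl _⟩
      have hu01 : d1 u0 = some p := by
        by_cases hv : u0 = e0.1
        · exfalso
          rw [hv] at hu0
          rw [hu0] at hlt
          simp only [ltInf, decide_eq_true_eq] at hlt
          omega
        · simp [hd1, hv, hu0]
      obtain ⟨iDle, iach, ipq, igrow, irel, iu0, inew, imeas⟩ :=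
        ih d1 (pq ++ [(p + e0.2, e0.1)]) (fun vw' h => hadjE vw' (List.mem_cons_of_mem _ h)) hach1 hpq1 hu01
      have hstrict : lex2lt (ncount n' d1, sfin n' d1) (ncount n' d, sfin n' d) = true := by
        cases hdv : d e0.1 with
        | none => exact measure_upd_none hrng.1 hrng.2 hdv
        | some y =>
          rw [hdv] at hlt
          simp only [ltInf, decide_eq_true_eq] at hlt
          exact measure_upd_some hrng.1 hrng.2 hdv (by omega) hlt
      refine ⟨Dle_trans iDle hDle1, iach, ipq, ?_, ?_, iu0, ?_, ?_⟩
      · intro q hq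
        exact igrow q (List.mem_append.mpr (Or.inl hq))
      · intro vw' hvw'
        rcases List.mem_cons.mp hvw' with h | h
        · subst h
          obtain ⟨y, hy, hle⟩ := iDle vw'.1 (p + vw'.2) (by simp [hd1])
          exact ⟨y, hy, hle⟩
        · exact irel vw' h
      · intro u x hux
        rcases inew u x hux with h | h
        · by_cases hv : u = e0.1
          · subst hv
            simp only [hd1, if_pos rfl] at h
            injection h with h
            exact Or.inr (igrow _ (List.mem_append.mpr (Or.inr (by simp [h]))))
          · simp only [hd1, if_neg hv] at h
            exact Or.inl h
        · exact Or.inr h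
      · rcases imeas with ⟨heq, _⟩ | hm
        · rw [heq]
          exact Or.inr hstrict
        · exact Or.inr (lex2lt_trans hm hstrict)
    · -- no update
      rw [if_neg hlt]
      obtain ⟨iDle, iach, ipq, igrow, irel, iu0, inew, imeas⟩ :=
        ih d pq (fun vw' h => hadjE vw' (List.mem_cons_of_mem _ h)) hach hpq hu0
      refine ⟨iDle, iach, ipq, igrow, ?_, iu0, inew, imeas⟩
      intro vw' hvw'
      rcases List.mem_cons.mp hvw' with h | h
      · subst h
        cases hdv : d vw'.1 with
        | none => exfalso; rw [hdv] at hlt; simp [ltInf] at hlt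
        | some y =>
          rw [hdv] at hlt
          simp only [ltInf, decide_eq_true_eq] at hlt
          obtain ⟨y', hy', hle⟩ := iDle vw'.1 y hdv
          exact ⟨y', hy', by omega⟩
      · exact irel vw' h

theorem minEntry_mem (x : Int × Int) (xs : List (Int × Int)) : minEntry x xs ∈ x :: xs := by
  induction xs generalizing x with
  | nil => simp [minEntry]
  | cons y ys ih =>
    have : minEntry x (y :: ys) = minEntry (if pairLt y x then y else x) ys := rfl
    rw [this]
    rcases List.mem_cons.mp (ih (if pairLt y x then y else x)) with h | h
    · rw [h]
      by_cases hp : pairLt y x = true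
      · simp [hp]
      · simp [hp]
    · simp [h]

def InvA (E : List (Int × Int × Int)) (s : Int) (st : (Int → Option Int) × List (Int × Int)) : Prop :=
  Achieves E s st.1 ∧ BaseAt s st.1 ∧
  (∀ q ∈ st.2, ∃ y, st.1 q.2 = some y ∧ y ≤ q.1) ∧
  (∀ u x, st.1 u = some x →
    (∀ v w, (u, v, w) ∈ E → ∃ y, st.1 v = some y ∧ y ≤ x + w) ∨ (x, u) ∈ st.2)

theorem stepA_spec {E : List (Int × Int × Int)} {s : Int} {n' : Nat}
    (hw : ∀ e ∈ E, 0 ≤ e.2.2)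
    (hrange : ∀ e ∈ E, (0 ≤ e.1 ∧ e.1 < (n' : Int)) ∧ (0 ≤ e.2.1 ∧ e.2.1 < (n' : Int)))
    {g : PySem.Dict Int (List (Int × Int))}
    (hadj : ∀ (u : Int) (vw : Int × Int), vw ∈ g.getD u [] ↔ (u, vw.1, vw.2) ∈ E)
    (d : Int → Option Int) (q : Int × Int) (qs : List (Int × Int))
    (hinv : InvA E s (d, q :: qs)) :
    InvA E s (stepA g (d, q :: qs)) ∧
    lex3lt (muA n' (stepA g (d, q :: qs))) (muA n' (d, q :: qs)) = true := by
  obtain ⟨hach, hbase, hpq, hrelax⟩ := hinv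
  set m := minEntry q qs with hmdef
  have hm : m ∈ q :: qs := minEntry_mem q qs
  obtain ⟨y, hy, hyle⟩ := hpq m hm
  have hrlen : ((q :: qs).erase m).length < qs.length + 1 := by
    rw [List.length_erase_of_mem hm]; simp
  have hrsub : ∀ a, a ∈ (q :: qs).erase m → a ∈ q :: qs := fun a ha => List.erase_subset ha
  have hstep : stepA g (d, q :: qs) =
      if y < m.1 then (d, (q :: qs).erase m)
      else relaxA m.1 (g.getD m.2 []) (d, (q :: qs).erase m) := by
    have hy' : d m.2 = some y := hy
    simp only [stepA, ← hmdef]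
    rw [hy']
  by_cases hstale : y < m.1
  · rw [hstep, if_pos hstale]
    refine ⟨⟨hach, hbase, ?_, ?_⟩, ?_⟩
    · intro q' hq'; exact hpq q' (hrsub q' hq')
    · intro u x hux
      rcases hrelax u x hux with hl | hr
      · exact Or.inl hl
      · refine Or.inr ?_
        have hne : (x, u) ≠ m := by
          intro heq
          have hu : u = m.2 := by rw [← heq]
          have hx : x = m.1 := by rw [← heq]
          rw [hu, hy] at hux
          injection hux with hux
          omega
        exact (List.mem_erase_of_ne hne).mpr hr
    · simp [muA, lex3lt]
      omega
  · have hym : y = m.1 := by omega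
    rw [hym] at hy
    have hp0 : 0 ≤ m.1 := reach_nonneg hw (hach m.2 m.1 hy)
    have hpr : Reach E s m.2 m.1 := hach m.2 m.1 hy
    obtain ⟨rDle, rach, rpq, rgrow, rrel, ru0, rnew, rmeas⟩ :=
      relaxA_spec hw hrange hp0 hpr (g.getD m.2 []) d ((q :: qs).erase m)
        (fun vw h => (hadj m.2 vw).mp h) hach
        (fun q' hq' => hpq q' (hrsub q' hq')) hy
    rw [hstep, if_neg hstale]
    refine ⟨⟨rach, ?_, rpq, ?_⟩, ?_⟩
    · obtain ⟨z, hz, hz0⟩ := hbase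
      obtain ⟨z', hz', hle⟩ := rDle s z hz
      exact ⟨z', hz', by omega⟩
    · intro u x hux
      rcases rnew u x hux with hold | hnew2
      · rcases hrelax u x hold with hl | hr
        · refine Or.inl ?_
          intro v w he
          obtain ⟨yv, hyv, hlev⟩ := hl v w he
          obtain ⟨yv', hyv', hlev'⟩ := rDle v yv hyv
          exact ⟨yv', hyv', by omega⟩
        · by_cases heq : (x, u) = m
          · refine Or.inl ?_
            have hu : u = m.2 := by rw [← heq]
            have hx : x = m.1 := by rw [← heq]
            intro v w he
            obtain ⟨yv, hyv, hlev⟩ := rrel (v, w) ((hadj m.2 (v, w)).mpr (by rw [← hu]; exact he))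
            exact ⟨yv, hyv, by omega⟩
          · exact Or.inr (rgrow _ ((List.mem_erase_of_ne heq).mpr hr))
      · exact Or.inr hnew2
    · rcases rmeas with ⟨hdeq, hpqeq⟩ | hm2
      · simp [muA, lex3lt, hdeq, hpqeq]
        omega
      · simp only [lex2lt, Bool.or_eq_true, decide_eq_true_eq, Bool.and_eq_true, beq_iff_eq] at hm2
        simp [muA, lex3lt]
        omega

theorem dloop_post {E : List (Int × Int × Int)} {s : Int} {n' : Nat}
    (hw : ∀ e ∈ E, 0 ≤ e.2.2)
    (hrange : ∀ e ∈ E, (0 ≤ e.1 ∧ e.1 < (n' : Int)) ∧ (0 ≤ e.2.1 ∧ e.2.1 < (n' : Int)))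
    {g : PySem.Dict Int (List (Int × Int))}
    (hadj : ∀ (u : Int) (vw : Int × Int), vw ∈ g.getD u [] ↔ (u, vw.1, vw.2) ∈ E)
    (st : (Int → Option Int) × List (Int × Int)) :
    InvA E s st →
    Achieves E s (dloop n' g st) ∧ StableAt E (dloop n' g st) ∧ BaseAt s (dloop n' g st) := by
  fun_induction dloop n' g st with
  | case1 st heq =>
    intro hinv
    obtain ⟨hach, hbase, hpq, hrelax⟩ := hinv
    refine ⟨hach, ?_, hbase⟩
    intro u v w x he hd
    rcases hrelax u x hd with hl | hr
    · exact hl v w he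
    · rw [heq] at hr; cases hr
  | case2 st hd tl heq st' h ih =>
    intro hinv
    obtain ⟨d0, pq0⟩ := st
    simp only at heq
    subst heq
    exact ih (stepA_spec hw hrange hadj d0 hd tl hinv).1
  | case3 st hd tl heq st' h =>
    intro hinv
    obtain ⟨d0, pq0⟩ := st
    simp only at heq
    subst heq
    exact absurd (stepA_spec (n' := n') hw hrange hadj d0 hd tl hinv).2 h

theorem relaxB_cons (e : Int × Int × Int) (edges : List (Int × Int × Int))
    (d : Int → Option Int) (b : Bool) :
    relaxB (e :: edges) (d, b) =
      relaxB edges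
        (match d e.1 with
         | none => (d, b)
         | some x =>
           if ltInf (x + e.2.2) (d e.2.1) then
             (fun z => if z = e.2.1 then some (x + e.2.2) else d z, true)
           else (d, b)) := rfl

theorem relaxB_spec {E : List (Int × Int × Int)} {s : Int} {n' : Nat}
    (hw : ∀ e ∈ E, 0 ≤ e.2.2)
    (hrange : ∀ e ∈ E, (0 ≤ e.1 ∧ e.1 < (n' : Int)) ∧ (0 ≤ e.2.1 ∧ e.2.1 < (n' : Int))) :
    ∀ (edges : List (Int × Int × Int)) (d : Int → Option Int) (b : Bool),
    (∀ e ∈ edges, e ∈ E) → Achieves E s d →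
    Dle (relaxB edges (d, b)).1 d ∧
    Achieves E s (relaxB edges (d, b)).1 ∧
    (((relaxB edges (d, b)).1 = d ∧ (relaxB edges (d, b)).2 = b ∧
      (∀ e ∈ edges, ∀ x, d e.1 = some x → ∃ y, d e.2.1 = some y ∧ y ≤ x + e.2.2)) ∨
     ((relaxB edges (d, b)).2 = true ∧
      lex2lt (ncount n' (relaxB edges (d, b)).1, sfin n' (relaxB edges (d, b)).1)
        (ncount n' d, sfin n' d) = true)) := by
  intro edges
  induction edges with
  | nil =>
    intro d b _ hach
    exact ⟨Dle_refl d, hach, Or.inl ⟨rfl, rfl, by simp⟩⟩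
  | cons e rest ih =>
    intro d b hEsub hach
    have heE : e ∈ E := hEsub e (List.mem_cons_self ..)
    have hwe : 0 ≤ e.2.2 := hw _ heE
    have hrng := (hrange _ heE).2
    rw [relaxB_cons]
    split
    next hs =>
      obtain ⟨iDle, iach, idisj⟩ := ih d b (fun e' h => hEsub e' (List.mem_cons_of_mem _ h)) hach
      refine ⟨iDle, iach, ?_⟩
      rcases idisj with ⟨h1, h2, h3⟩ | hr
      · refine Or.inl ⟨h1, h2, ?_⟩
        intro e' he' x hx
        rcases List.mem_cons.mp he' with h | h
        · subst h; rw [hs] at hx; cases hx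
        · exact h3 e' h x hx
      · exact Or.inr hr
    next x hs =>
      have hx0 : 0 ≤ x := reach_nonneg hw (hach e.1 x hs)
      by_cases hlt : ltInf (x + e.2.2) (d e.2.1) = true
      · rw [if_pos hlt]
        set d1 : Int → Option Int := fun z => if z = e.2.1 then some (x + e.2.2) else d z with hd1
        have hDle1 : Dle d1 d := by
          intro v xv hv
          by_cases hveq : v = e.2.1
          · subst hveq
            rw [hv] at hlt
            simp only [ltInf, decide_eq_true_eq] at hlt
            exact ⟨x + e.2.2, by simp [hd1], le_of_lt hlt⟩
          · exact ⟨xv, by simp [hd1, hveq, hv], le_refl _⟩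
        have hach1 : Achieves E s d1 := by
          intro v xv hv
          by_cases hveq : v = e.2.1
          · subst hveq
            simp only [hd1, if_pos rfl] at hv
            injection hv with hv
            rw [← hv]
            exact Reach.step (hach e.1 x hs) (by rw [show (e.1, e.2.1, e.2.2) = e from rfl]; exact heE)
          · simp only [hd1, if_neg hveq] at hv
            exact hach v xv hv
        have hstrict : lex2lt (ncount n' d1, sfin n' d1) (ncount n' d, sfin n' d) = true := by
          cases hdv : d e.2.1 with
          | none => exact measure_upd_none hrng.1 hrng.2 hdv
          | some y =>
            rw [hdv] at hlt
            simp only [ltInf, decide_eq_true_eq] at hlt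
            exact measure_upd_some hrng.1 hrng.2 hdv (by omega) hlt
        obtain ⟨iDle, iach, idisj⟩ := ih d1 true (fun e' h => hEsub e' (List.mem_cons_of_mem _ h)) hach1
        refine ⟨Dle_trans iDle hDle1, iach, Or.inr ?_⟩
        rcases idisj with ⟨h1, h2, _⟩ | ⟨h1, h2⟩
        · exact ⟨h2, by rw [h1]; exact hstrict⟩
        · exact ⟨h1, lex2lt_trans h2 hstrict⟩
      · rw [if_neg hlt]
        obtain ⟨iDle, iach, idisj⟩ := ih d b (fun e' h => hEsub e' (List.mem_cons_of_mem _ h)) hach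
        refine ⟨iDle, iach, ?_⟩
        rcases idisj with ⟨h1, h2, h3⟩ | hr
        · refine Or.inl ⟨h1, h2, ?_⟩
          intro e' he' x' hx'
          rcases List.mem_cons.mp he' with h | h
          · subst h
            rw [hs] at hx'
            injection hx' with hx'
            subst hx'
            cases hdv : d e'.2.1 with
            | none => rw [hdv] at hlt; simp [ltInf] at hlt
            | some y =>
              rw [hdv] at hlt
              simp only [ltInf, decide_eq_true_eq] at hlt
              exact ⟨y, rfl, by omega⟩
          · exact h3 e' h x' hx'
        · exact Or.inr hr

theorem bloop_post {E : List (Int × Int × Int)} {s : Int} {n' : Nat}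
    (hw : ∀ e ∈ E, 0 ≤ e.2.2)
    (hrange : ∀ e ∈ E, (0 ≤ e.1 ∧ e.1 < (n' : Int)) ∧ (0 ≤ e.2.1 ∧ e.2.1 < (n' : Int)))
    (d : Int → Option Int) :
    Achieves E s d → BaseAt s d →
    Achieves E s (bloop n' E d) ∧ StableAt E (bloop n' E d) ∧ BaseAt s (bloop n' E d) := by
  fun_induction bloop n' E d with
  | case1 d st hb h ih =>
    intro hach hbase
    obtain ⟨rDle, rach, rdisj⟩ := relaxB_spec hw hrange E d false (fun e h => h) hach
    refine ih rach ?_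
    obtain ⟨z, hz, hz0⟩ := hbase
    obtain ⟨z', hz', hle⟩ := rDle s z hz
    exact ⟨z', hz', by omega⟩
  | case2 d st hb h =>
    intro hach hbase
    obtain ⟨rDle, rach, rdisj⟩ := relaxB_spec (n' := n') hw hrange E d false (fun e h => h) hach
    have hb' : (relaxB E (d, false)).2 = true := hb
    rcases rdisj with ⟨_, h2, _⟩ | ⟨_, h2⟩
    · rw [h2] at hb'; cases hb'
    · exact absurd h2 h
  | case3 d st hb =>
    intro hach hbase
    obtain ⟨rDle, rach, rdisj⟩ := relaxB_spec (n' := n') hw hrange E d false (fun e h => h) hach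
    have hb' : ¬(relaxB E (d, false)).2 = true := hb
    rcases rdisj with ⟨h1, _, h3⟩ | ⟨h1, _⟩
    · exact ⟨hach, fun u v w x he hd => h3 (u, v, w) he x hd, hbase⟩
    · exact absurd h1 hb'

def contribB (m : PySem.Set Int) (road : List Int) : List (Int × Int × Int) :=
  match road with
  | [u, v, w] =>
    if PySem.Set.contains m u && PySem.Set.contains m v then [(u, v, w), (v, u, w)] else []
  | _ => []

theorem buildEdges_eq (m : PySem.Set Int) (roads : List (List Int)) :
    buildEdges m roads = roads.flatMap (contribB m) := by
  suffices h : ∀ acc : List (Int × Int × Int),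
      roads.foldl (fun es road =>
        match road with
        | [u, v, w] =>
          if PySem.Set.contains m u && PySem.Set.contains m v then
            es ++ [(u, v, w), (v, u, w)]
          else es
        | _ => es) acc = acc ++ roads.flatMap (contribB m) by
    simpa [buildEdges] using h []
  induction roads with
  | nil => intro acc; simp
  | cons road rest ih =>
    intro acc
    rw [List.foldl_cons, List.flatMap_cons, ih]
    have hstep : (match road with
        | [u, v, w] =>
          if PySem.Set.contains m u && PySem.Set.contains m v then
            acc ++ [(u, v, w), (v, u, w)]
          else acc
        | _ => acc) = acc ++ contribB m road := by
      rcases road with _ | ⟨u, _ | ⟨v, _ | ⟨w, _ | ⟨a, t⟩⟩⟩⟩ <;> simp [contribB]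
      split <;> simp
    rw [hstep, List.append_assoc]

theorem mem_buildEdges (m : PySem.Set Int) (roads : List (List Int)) (e : Int × Int × Int) :
    e ∈ buildEdges m roads ↔ ∃ road ∈ roads, e ∈ contribB m road := by
  rw [buildEdges_eq]; exact List.mem_flatMap

theorem contribB_cases {m : PySem.Set Int} {road : List Int} {e : Int × Int × Int}
    (h : e ∈ contribB m road) :
    ∃ u v w, road = [u, v, w] ∧ (e = (u, v, w) ∨ e = (v, u, w)) ∧
      m.contains u = true ∧ m.contains v = true := by
  rcases road with _ | ⟨u, _ | ⟨v, _ | ⟨w, _ | ⟨a, t⟩⟩⟩⟩ <;>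
    simp only [contribB] at h <;> try cases h
  by_cases hc : (m.contains u && m.contains v) = true
  · rw [if_pos hc] at h
    obtain ⟨hu, hv⟩ := Bool.and_eq_true_iff.mp hc
    simp only [List.mem_cons, List.mem_singleton] at h
    rcases h with h | h | h
    · exact ⟨u, v, w, rfl, Or.inl h, hu, hv⟩
    · exact ⟨u, v, w, rfl, Or.inr h, hu, hv⟩
    · cases h
  · rw [if_neg hc] at h
    cases h

theorem buildGraph_getD (subset : List Int) (roads : List (List Int)) :
    ∀ (u : Int) (vw : Int × Int),
      vw ∈ (buildGraph subset roads).getD u [] ↔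
        (u, vw.1, vw.2) ∈ buildEdges (PySem.Set.ofList subset) roads := by
  have hcont : ∀ x : Int, (PySem.Set.ofList subset).contains x = subset.contains x := by
    intro x
    rw [Bool.eq_iff_iff, PySem.Set.contains_iff, List.contains_iff_mem, PySem.Set.mem_ofList]
  rw [buildEdges_eq]
  suffices h : ∀ (roadsl : List (List Int)) (g : PySem.Dict Int (List (Int × Int))),
      (∀ (u : Int) (vw : Int × Int),
        vw ∈ (roadsl.foldl (fun g road =>
          match road with
          | [u, v, w] =>
            if subset.contains u && subset.contains v then
              let g1 := g.insert u (g.getD u [] ++ [(v, w)])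
              g1.insert v (g1.getD v [] ++ [(u, w)])
            else g
          | _ => g) g).getD u [] ↔
          vw ∈ g.getD u [] ∨ (u, vw.1, vw.2) ∈ roadsl.flatMap (contribB (PySem.Set.ofList subset))) by
    intro u vw
    rw [show buildGraph subset roads = roads.foldl _ PySem.Dict.empty from rfl]
    rw [h roads PySem.Dict.empty u vw]
    simp [PySem.Dict.getD_empty]
  intro roadsl
  induction roadsl with
  | nil => intro g u vw; simp
  | cons road rest ih =>
    intro g u vw
    rw [List.foldl_cons, List.flatMap_cons]
    rcases road with _ | ⟨u0, _ | ⟨v0, _ | ⟨w0, _ | ⟨a, t⟩⟩⟩⟩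
    · rw [ih]; simp [contribB]
    · rw [ih]; simp [contribB]
    · rw [ih]; simp [contribB]
    · by_cases hc : (subset.contains u0 && subset.contains v0) = true
      · simp only [hc, if_pos]
        rw [ih]
        simp only [contribB, hcont, hc, if_pos]
        by_cases h1 : u = v0
        · subst h1
          by_cases h2 : u = u0
          · subst h2
            simp [PySem.Dict.getD_insert, Prod.ext_iff, List.mem_append]
            try tauto
          · simp [PySem.Dict.getD_insert, Prod.ext_iff, List.mem_append, h2, Ne.symm h2]
            try tauto
        · by_cases h2 : u = u0
          · subst h2
            simp [PySem.Dict.getD_insert, Prod.ext_iff, List.mem_append, h1, Ne.symm h1]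
            try tauto
          · simp [PySem.Dict.getD_insert, Prod.ext_iff, List.mem_append, h1, h2, Ne.symm h1, Ne.symm h2]
            try tauto
      · simp only [hc, if_neg]
        rw [ih]
        simp only [contribB, hcont, hc]
        simp
    · rw [ih]; simp [contribB]

theorem edge_props {n maxDistance : Int} {roads : List (List Int)}
    (hpre : Pre_numberOfSets n maxDistance roads) (hn : 0 ≤ n)
    {subset : List Int} (hmem : ∀ v ∈ subset, 0 ≤ v ∧ v < n) :
    (∀ e ∈ buildEdges (PySem.Set.ofList subset) roads, 0 ≤ e.2.2) ∧
    (∀ e ∈ buildEdges (PySem.Set.ofList subset) roads,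
      (0 ≤ e.1 ∧ e.1 < ((n.toNat : Nat) : Int)) ∧ (0 ≤ e.2.1 ∧ e.2.1 < ((n.toNat : Nat) : Int))) := by
  have hcast : ((n.toNat : Nat) : Int) = n := Int.toNat_of_nonneg hn
  have key : ∀ e ∈ buildEdges (PySem.Set.ofList subset) roads,
      0 ≤ e.2.2 ∧ (0 ≤ e.1 ∧ e.1 < n) ∧ (0 ≤ e.2.1 ∧ e.2.1 < n) := by
    intro e he
    obtain ⟨road, hr, hcb⟩ := (mem_buildEdges _ _ _).mp he
    obtain ⟨u, v, w, rfl, hor, hu, hv⟩ := contribB_cases hcb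
    have hus : u ∈ subset := (PySem.Set.mem_ofList _ _).mp ((PySem.Set.contains_iff _ _).mp hu)
    have hvs : v ∈ subset := (PySem.Set.mem_ofList _ _).mp ((PySem.Set.contains_iff _ _).mp hv)
    have hub := hmem u hus
    have hvb := hmem v hvs
    have hw0 : 0 ≤ w := by
      have h2 := (hpre hn _ hr).2
      simp only [List.getD] at h2
      simp at h2
      omega
    rcases hor with rfl | rfl
    · exact ⟨hw0, hub, hvb⟩
    · exact ⟨hw0, hvb, hub⟩
  constructor
  · intro e he; exact (key e he).1
  · intro e he
    rw [hcast]
    exact ⟨(key e he).2.1, (key e he).2.2⟩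

theorem invA_init (E : List (Int × Int × Int)) (s : Int) :
    InvA E s ((fun z => if z = s then some 0 else none), [(0, s)]) := by
  refine ⟨?_, ⟨0, by simp, le_refl 0⟩, ?_, ?_⟩
  · intro v x h
    by_cases hv : v = s
    · subst hv
      simp only [if_pos rfl] at h
      injection h with h
      rw [← h]
      exact Reach.refl
    · simp [hv] at h
  · intro q hq
    simp only [List.mem_singleton] at hq
    subst hq
    exact ⟨0, by simp, le_refl 0⟩
  · intro u x h
    by_cases hu : u = s
    · subst hu
      simp only [if_pos rfl] at h
      injection h with h
      rw [← h]
      simp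
    · simp [hu] at h

theorem dists_eq {E : List (Int × Int × Int)} {n' : Nat}
    (hw : ∀ e ∈ E, 0 ≤ e.2.2)
    (hrange : ∀ e ∈ E, (0 ≤ e.1 ∧ e.1 < (n' : Int)) ∧ (0 ≤ e.2.1 ∧ e.2.1 < (n' : Int)))
    {g : PySem.Dict Int (List (Int × Int))}
    (hadj : ∀ (u : Int) (vw : Int × Int), vw ∈ g.getD u [] ↔ (u, vw.1, vw.2) ∈ E)
    (s : Int) :
    ∀ v, dloop n' g ((fun z => if z = s then some 0 else none), [(0, s)]) v =
      bloop n' E (fun z => if z = s then some 0 else none) v := by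
  obtain ⟨ha1, hs1, hb1⟩ := dloop_post (s := s) hw hrange hadj _ (invA_init E s)
  have hach0 : Achieves E s (fun z => if z = s then some 0 else none) := by
    intro v x h
    by_cases hv : v = s
    · subst hv
      simp only [if_pos rfl] at h
      injection h with h
      rw [← h]
      exact Reach.refl
    · simp [hv] at h
  have hbase0 : BaseAt s (fun z => if z = s then some 0 else none) := ⟨0, by simp, le_refl 0⟩
  obtain ⟨ha2, hs2, hb2⟩ := bloop_post hw hrange _ hach0 hbase0
  exact dist_unique ha1 hs1 hb1 ha2 hs2 hb2

theorem foldl_iffalse {α : Type} (l : List α) (P : α → Bool) :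
    ∀ b : Bool, l.foldl (fun ok t => if P t then false else ok) b = (b && l.all (fun t => !P t)) := by
  induction l with
  | nil => intro b; simp
  | cons x xs ih =>
    intro b
    rw [List.foldl_cons, List.all_cons, ih]
    cases hP : P x <;> simp [hP]

theorem foldl_and_eq {α : Type} (l : List α) (f : α → Bool) :
    ∀ b : Bool, l.foldl (fun ok s => ok && f s) b = (b && l.all f) := by
  induction l with
  | nil => intro b; simp
  | cons x xs ih =>
    intro b
    rw [List.foldl_cons, List.all_cons, ih]
    cases hf : f x <;> simp [hf, Bool.and_assoc]

theorem valid_eq {n maxDistance : Int} {roads : List (List Int)}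
    (hpre : Pre_numberOfSets n maxDistance roads) (hn : 0 ≤ n)
    (subset : List Int) (hmem : ∀ v ∈ subset, 0 ≤ v ∧ v < n) :
    validA n maxDistance roads subset = validB n maxDistance roads subset := by
  obtain ⟨hw, hrange⟩ := edge_props hpre hn hmem
  have hadj : ∀ (u : Int) (vw : Int × Int),
      vw ∈ (buildGraph subset roads).getD u [] ↔
        (u, vw.1, vw.2) ∈ buildEdges (PySem.Set.ofList subset) roads :=
    buildGraph_getD subset roads
  have hdists := fun s => dists_eq hw hrange hadj s
  unfold validA validB
  simp only [foldl_iffalse, foldl_and_eq, Bool.true_and]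
  refine List.all_congr rfl ?_
  intro node
  refine List.all_congr rfl ?_
  intro other
  rw [hdists node other]

theorem ports_eq (n maxDistance : Int) (roads : List (List Int))
    (hpre : Pre_numberOfSets n maxDistance roads) :
    numberOfSets n maxDistance roads = numberOfSets_alt n maxDistance roads := by
  unfold numberOfSets numberOfSets_alt
  apply PySem.List.foldl_congr_mem
  intro acc r hr
  have hrb := PySem.List.mem_pyRange_one.mp hr
  have hn : 0 ≤ n := by omega
  apply PySem.List.foldl_congr_mem
  intro acc2 subset hsub
  have hmem : ∀ v ∈ subset, 0 ≤ v ∧ v < n := by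
    intro v hv
    have hsl := ((PySem.List.mem_combinations_iff _ _ _).mp hsub).1
    have hvr : v ∈ PySem.List.pyRange 0 n 1 := hsl.subset hv
    have := PySem.List.mem_pyRange_one.mp hvr
    omega
  rw [valid_eq hpre hn subset hmem]

-- ===== VERDICT (by name: the statement is the Claim_ definition above) =====
theorem numberOfSets_spec : Claim_equal_numberOfSets := by
  intro n maxDistance roads _ hpre
  unfold Spec_numberOfSets
  exact ports_eq n maxDistance roads hpre
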